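-- pv_equiv track=rewrite | github.com/kri-k/information-retrieval | input_parser.py | check_postfix_expr
-- ===== SOURCE A (Python) =====
-- def check_postfix_expr(s):
--     stack = []
--     cnt = 0
--     for c in s:
--         if c in '&|':
--             if len(stack) < 2:
--                 return None
--             a = stack.pop()
--             b = stack.pop()
--             if a == '@' and b == '@':
--                 stack.append(a)
--             else:
--                 return None
--         elif c == '!':
--             if len(stack) < 1 or stack[-1] != '@':
--                 return None
--         else:
--             stack.append('@')
--             cnt += 1
--     if len(stack) == 1 and stack[0] == '@':
--         return cnt
--     return None
-- ===== SOURCE B (Python) =====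
-- def check_postfix_expr(s):
--     weights = [0 if c == '!' else -1 if c in '&|' else 1 for c in s]
--     prefixes = []
--     total = 0
--     for w in weights:
--         total += w
--         prefixes.append(total)
--     if total == 1 and all(p >= 1 for w, p in zip(weights, prefixes) if w <= 0):
--         return weights.count(1)
--     return None
-- ===== Notes on version B (the rewrite author's own statement) =====
-- stated objective: alternative
-- what changed: Replaces A's stateful stack simulation with early returns by an arithmetic characterization in staged passes: map each character to an integer weight, build the prefix-sum list, and accept iff the total is 1 and every prefix sum at an operator position is at least 1; the operand count is recovered as weights.count(1).
import Mathlib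
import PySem

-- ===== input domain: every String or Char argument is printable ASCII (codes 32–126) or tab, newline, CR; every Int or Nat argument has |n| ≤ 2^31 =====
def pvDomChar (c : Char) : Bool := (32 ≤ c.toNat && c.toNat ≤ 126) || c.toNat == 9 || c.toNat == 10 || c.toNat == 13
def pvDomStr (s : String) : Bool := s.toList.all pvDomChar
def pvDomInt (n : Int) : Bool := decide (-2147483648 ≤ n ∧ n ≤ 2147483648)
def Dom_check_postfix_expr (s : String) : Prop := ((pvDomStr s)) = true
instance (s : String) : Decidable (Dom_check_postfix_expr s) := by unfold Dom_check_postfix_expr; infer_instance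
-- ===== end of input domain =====

-- B drops A's stateful stack simulation for an arithmetic characterization in staged
-- passes (weights, prefix sums, one global check); same O(n) cost, alternative algorithm.

-- ===== PORT A =====
-- The Python stack is represented head-as-top (append = cons, pop = head, stack[-1] = head).
def checkPostfixLoopA : List Char → List Char → Int → Option Int
  | [], stack, cnt =>
      if stack.length == 1 && stack.head? == some '@' then some cnt else none
  | c :: cs, stack, cnt =>
      if c == '&' || c == '|' then
        if stack.length < 2 then none
        else
          match stack with
          | a :: b :: rest =>
              if a == '@' && b == '@' then checkPostfixLoopA cs (a :: rest) cnt else none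
          | _ => none
      else if c == '!' then
        if stack.length < 1 || !(stack.head? == some '@') then none
        else checkPostfixLoopA cs stack cnt
      else
        checkPostfixLoopA cs ('@' :: stack) (cnt + 1)

def check_postfix_expr (s : String) : Option Int :=
  checkPostfixLoopA s.toList [] 0

-- ===== PORT B =====
-- weight of a character: 0 for '!', -1 for '&'/'|', 1 for an operand
def pvWt (c : Char) : Int := if c == '!' then 0 else if c == '&' || c == '|' then -1 else 1

def check_postfix_expr_alt (s : String) : Option Int :=
  let weights := s.toList.map pvWt
  -- one loop builds (total, prefixes), as in Source B
  let st := weights.foldl (fun (acc : Int × List Int) w => (acc.1 + w, acc.2 ++ [acc.1 + w])) (0, [])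
  if st.1 == 1 &&
      (weights.zip st.2).all (fun wp => decide (0 < wp.1) || decide (1 ≤ wp.2)) then
    some (PySem.List.count weights 1)
  else none

-- ===== PRECONDITION & SPEC =====
def Spec_check_postfix_expr (s : String) (out : Option Int) : Prop := out = check_postfix_expr_alt s
instance (s : String) (out : Option Int) : Decidable (Spec_check_postfix_expr s out) := by unfold Spec_check_postfix_expr; infer_instance

-- ===== CLAIM (what is proved, stated in full; the proofs are below) =====
def Claim_equal_check_postfix_expr : Prop := ∀ (s : String), Dom_check_postfix_expr s → Spec_check_postfix_expr s (check_postfix_expr s)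

-- ===== LEMMAS AND PROOFS =====

-- proof-side abstraction of A: depth counter instead of the stack of sentinels
def pvDepthLoop : List Char → Int → Int → Option Int
  | [], depth, cnt => if depth == 1 then some cnt else none
  | c :: cs, depth, cnt =>
      if c == '!' then
        if depth < 1 then none else pvDepthLoop cs depth cnt
      else if c == '&' || c == '|' then
        if depth < 2 then none else pvDepthLoop cs (depth - 1) cnt
      else
        pvDepthLoop cs (depth + 1) (cnt + 1)

-- A's stack is always a pile of n sentinels '@'; then A's loop equals the depth loop at depth n.
theorem checkPostfixLoopA_eq_depth (cs : List Char) :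
    ∀ (n : ℕ) (cnt : Int),
      checkPostfixLoopA cs (List.replicate n '@') cnt = pvDepthLoop cs (n : Int) cnt := by
  induction cs with
  | nil =>
      intro n cnt
      rcases n with _ | n
      · simp [checkPostfixLoopA, pvDepthLoop]
      · rcases n with _ | n
        · simp [checkPostfixLoopA, pvDepthLoop, List.replicate]
        · simp [checkPostfixLoopA, pvDepthLoop, List.replicate]
          omega
  | cons c cs ih =>
      intro n cnt
      by_cases hop : (c == '&' || c == '|') = true
      · have hne : (c == '!') = false := by
          rcases Bool.or_eq_true .. |>.mp hop with h | h <;> simp_all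
        rcases n with _ | n
        · simp [checkPostfixLoopA, pvDepthLoop, hop, hne]
        · rcases n with _ | n
          · simp [checkPostfixLoopA, pvDepthLoop, hop, hne, List.replicate]
          · have hrep : List.replicate (n + 1 + 1) '@' = '@' :: '@' :: List.replicate n '@' := rfl
            rw [hrep]
            simp only [checkPostfixLoopA, pvDepthLoop, hop, hne, Bool.false_eq_true,
              if_false, List.length_cons, beq_self_eq_true, Bool.and_self, if_true]
            rw [if_neg (by omega), if_neg (by push_cast; omega)]
            have h1 : ('@' :: List.replicate n '@') = List.replicate (n + 1) '@' := rfl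
            rw [h1, ih (n + 1) cnt]
            congr 1
            push_cast; ring
      · by_cases hbang : (c == '!') = true
        · rcases n with _ | n
          · simp [checkPostfixLoopA, pvDepthLoop, hop, hbang]
          · have hrep : List.replicate (n + 1) '@' = '@' :: List.replicate n '@' := rfl
            rw [hrep]
            simp only [checkPostfixLoopA, pvDepthLoop, hop, hbang, Bool.false_eq_true,
              if_false, if_true, List.length_cons, List.head?_cons, beq_self_eq_true,
              Bool.not_true, Bool.or_false]
            rw [if_neg (by simp), if_neg (by push_cast; omega), ← hrep, ih (n + 1) cnt]
        · simp only [checkPostfixLoopA, pvDepthLoop, hop, hbang, Bool.false_eq_true,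
            if_false]
          have h1 : ('@' :: List.replicate n '@') = List.replicate (n + 1) '@' := rfl
          rw [h1, ih (n + 1) (cnt + 1)]
          congr 1

-- proof-side: the prefix-sum list starting from t
def pvPrefixes : Int → List Int → List Int
  | _, [] => []
  | t, w :: ws => (t + w) :: pvPrefixes (t + w) ws

-- B's fold computes (t + sum ws, acc ++ pvPrefixes t ws)
theorem pvFold_eq (ws : List Int) : ∀ (t : Int) (acc : List Int),
    ws.foldl (fun (acc : Int × List Int) w => (acc.1 + w, acc.2 ++ [acc.1 + w])) (t, acc)
      = (t + ws.sum, acc ++ pvPrefixes t ws) := by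
  induction ws with
  | nil => intro t acc; simp [pvPrefixes]
  | cons w ws ih =>
      intro t acc
      simp only [List.foldl_cons, pvPrefixes, List.sum_cons, ih (t + w) (acc ++ [t + w]),
        List.append_assoc]
      refine Prod.ext ?_ ?_
      · simp; ring
      · simp

-- the short-circuiting validity check of the depth loop, as a Bool
def pvValid : List Char → Int → Bool
  | [], _ => true
  | c :: cs, d =>
      if c == '!' then decide (1 ≤ d) && pvValid cs d
      else if c == '&' || c == '|' then decide (2 ≤ d) && pvValid cs (d - 1)
      else pvValid cs (d + 1)

theorem pvDepthLoop_eq_valid (cs : List Char) : ∀ (d cnt : Int),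
    pvDepthLoop cs d cnt =
      if pvValid cs d ∧ d + (cs.map pvWt).sum = 1
      then some (cnt + ((cs.map pvWt).count 1 : Int)) else none := by
  induction cs with
  | nil => intro d cnt; simp [pvDepthLoop, pvValid]
  | cons c cs ih =>
      intro d cnt
      by_cases hbang : (c == '!') = true
      · have hc : c = '!' := eq_of_beq hbang
        have hop : (c == '&' || c == '|') = false := by subst hc; decide
        have hw : pvWt c = 0 := by subst hc; rfl
        simp only [pvDepthLoop, pvValid, List.map_cons, List.sum_cons, List.count_cons,
          hbang, hop, if_true, hw]
        rw [ih]
        by_cases hd : (1 : Int) ≤ d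
        · rw [if_neg (by omega)]
          simp [hd]
        · rw [if_pos (by omega), if_neg (by simp [hd])]
      · by_cases hop : (c == '&' || c == '|') = true
        · have hw : pvWt c = -1 := by
            simp only [pvWt]
            rw [if_neg hbang, if_pos hop]
          simp only [pvDepthLoop, pvValid, List.map_cons, List.sum_cons, List.count_cons, hbang,
            hop, Bool.false_eq_true, if_false, if_true, hw]
          rw [ih]
          by_cases hd : (2 : Int) ≤ d
          · rw [if_neg (by omega)]
            have h1 : (d - 1 + (List.map pvWt cs).sum = 1) ↔ (d + (-1 + (List.map pvWt cs).sum) = 1) := by omega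
            simp [hd, h1]
          · rw [if_pos (by omega), if_neg (by simp [hd])]
        · have hw : pvWt c = 1 := by
            simp only [pvWt]
            rw [if_neg hbang, if_neg hop]
          simp only [pvDepthLoop, pvValid, List.map_cons, List.sum_cons, List.count_cons, hbang,
            hop, Bool.false_eq_true, if_false, hw]
          rw [ih]
          have h1 : (d + 1 + (List.map pvWt cs).sum = 1) ↔ (d + (1 + (List.map pvWt cs).sum) = 1) := by omega
          by_cases hcond : (pvValid cs (d + 1) = true ∧ d + 1 + (List.map pvWt cs).sum = 1)
          · rw [if_pos hcond, if_pos ⟨hcond.1, h1.mp hcond.2⟩]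
            simp
            ring
          · rw [if_neg hcond, if_neg (by intro h; exact hcond ⟨h.1, h1.mpr h.2⟩)]

-- pvValid equals the zip-all condition of B
theorem pvAll_eq_valid (cs : List Char) : ∀ (d : Int),
    ((cs.map pvWt).zip (pvPrefixes d (cs.map pvWt))).all
        (fun wp => decide (0 < wp.1) || decide (1 ≤ wp.2)) = pvValid cs d := by
  induction cs with
  | nil => intro d; simp [pvValid]
  | cons c cs ih =>
      intro d
      simp only [List.map_cons, pvPrefixes, List.zip_cons_cons, List.all_cons, pvValid]
      rw [ih]
      by_cases hbang : (c == '!') = true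
      · have hw : pvWt c = 0 := by simp [pvWt, eq_of_beq hbang]
        simp [hbang, hw]
      · by_cases hop : (c == '&' || c == '|') = true
        · have hw : pvWt c = -1 := by simp only [pvWt]; rw [if_neg hbang, if_pos hop]
          simp only [hbang, hop, Bool.false_eq_true, if_false, if_true, hw]
          have h1 : (decide ((0:Int) < -1) || decide (1 ≤ d + -1)) = decide (2 ≤ d) := by
            rw [show (decide ((0:Int) < -1)) = false from rfl]
            rw [Bool.false_or, decide_eq_decide]
            omega
          rw [h1, show d + -1 = d - 1 by ring]
        · have hw : pvWt c = 1 := by simp only [pvWt]; rw [if_neg hbang, if_neg hop]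
          simp [hbang, hop, hw]

-- ===== VERDICT (by name: the statement is the Claim_ definition above) =====
theorem check_postfix_expr_spec : Claim_equal_check_postfix_expr := by
  intro s _
  unfold Spec_check_postfix_expr check_postfix_expr check_postfix_expr_alt
  rw [show ([] : List Char) = List.replicate 0 '@' from rfl, checkPostfixLoopA_eq_depth,
    pvDepthLoop_eq_valid]
  simp only [pvFold_eq, List.nil_append, Nat.cast_zero]
  rw [← pvAll_eq_valid]
  rcases h : ((List.map pvWt s.toList).zip
      (pvPrefixes 0 (List.map pvWt s.toList))).all
        (fun wp => decide (0 < wp.1) || decide (1 ≤ wp.2)) with _ | _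
  · simp
  · simp only [true_and]
    by_cases hs : (0 : Int) + (List.map pvWt s.toList).sum = 1
    · rw [if_pos hs]
      have hb : (List.map pvWt s.toList).sum = 1 := by omega
      simp [hb, PySem.List.count_eq]
    · rw [if_neg hs]
      have hb : ¬ (List.map pvWt s.toList).sum = 1 := by omega
      simp [hb]
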